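-- pv_equiv track=rewrite | github.com/assafzimand/NCC-PINN | experiments_analysis/scripts/analyze_frequency_monotonicity.py | parse_model_architecture
-- ===== SOURCE A (Python) =====
-- from typing import Dict, List, Optional, Any, Tuple
--
-- def parse_model_architecture(model_name: str) -> Tuple[int, int]:
--     """Extract num_layers and approximate weight count from model name.
--
--     Returns:
--         (num_layers, num_parameters)
--     """
--     parts = model_name.split('-')
--     architecture = []
--     for part in parts:
--         if part.isdigit():
--             architecture.append(int(part))
--
--     if len(architecture) < 2:
--         return 0, 0
--
--     num_layers = len(architecture) - 2  # Exclude input and output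
--
--     # Calculate parameters
--     total_params = 0
--     for i in range(len(architecture) - 1):
--         total_params += architecture[i] * architecture[i + 1] + architecture[i + 1]
--
--     return num_layers, total_params
-- ===== SOURCE B (Python) =====
-- def _params(arch):
--     if len(arch) < 2:
--         return 0
--     return arch[0] * arch[1] + arch[1] + _params(arch[1:])
--
--
-- def parse_model_architecture(model_name):
--     architecture = []
--     token = ''
--     for ch in model_name + '-':
--         if ch == '-':
--             if token and all('0' <= c <= '9' for c in token):
--                 architecture.append(int(token))
--             token = ''
--         else:
--             token += ch
--     if len(architecture) < 2:
--         return 0, 0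
--     return len(architecture) - 2, _params(architecture)
-- ===== Notes on version B (the rewrite author's own statement) =====
-- stated objective: alternative
-- what changed: A splits on '-', filters with str.isdigit, converts with int() and sums via an index loop over adjacent pairs; B never splits: it runs a single character-level tokenizer state machine over the string and computes the parameter total by structural recursion on the architecture list.
import Mathlib
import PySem

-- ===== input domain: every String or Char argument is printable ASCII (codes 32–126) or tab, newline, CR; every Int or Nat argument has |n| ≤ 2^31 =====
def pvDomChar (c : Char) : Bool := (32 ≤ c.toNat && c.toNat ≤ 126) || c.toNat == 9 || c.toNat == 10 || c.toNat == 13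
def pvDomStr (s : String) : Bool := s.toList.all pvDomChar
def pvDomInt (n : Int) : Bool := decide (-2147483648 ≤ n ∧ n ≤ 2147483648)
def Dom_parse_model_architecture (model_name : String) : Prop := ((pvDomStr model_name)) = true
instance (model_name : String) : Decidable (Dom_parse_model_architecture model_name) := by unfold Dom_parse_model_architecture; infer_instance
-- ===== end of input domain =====

-- B replaces A's split/isdigit/int pipeline and fused index loop by a single character-level
-- tokenizer (manual state machine over the characters) plus a structural recursion for the
-- parameter sum (objective: alternative).

-- ===== PORT A =====
def parse_model_architecture (model_name : String) : Int × Int :=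
  let parts := (PySem.Str.split? model_name "-").getD []
  let architecture := parts.foldl (fun acc part =>
      if PySem.Str.strIsdigit part then acc ++ [(PySem.Int.ofStr? part).getD 0] else acc) []
  if architecture.length < 2 then (0, 0)
  else
    let num_layers : Int := (architecture.length : Int) - 2
    let total_params := (PySem.List.pyRange 0 ((architecture.length : Int) - 1) 1).foldl
      (fun acc i => acc + PySem.List.pyGetD architecture i 0 * PySem.List.pyGetD architecture (i+1) 0
                        + PySem.List.pyGetD architecture (i+1) 0) 0
    (num_layers, total_params)

-- ===== PORT B =====
-- B's helper _params: structural recursion on the architecture list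
def pvParamsRec : List Int → Int
  | a :: b :: t => a * b + b + pvParamsRec (b :: t)
  | _ => 0

-- one step of B's tokenizer: state = (architecture so far, current token)
def pvScanStep (st : List Int × List Char) (ch : Char) : List Int × List Char :=
  if ch = '-' then
    (if !st.2.isEmpty && st.2.all (fun c => decide ('0' ≤ c) && decide (c ≤ '9'))
       then st.1 ++ [(PySem.Int.ofChars? st.2).getD 0] else st.1, [])
  else (st.1, st.2 ++ [ch])

def parse_model_architecture_alt (model_name : String) : Int × Int :=
  let st := (model_name.toList ++ ['-']).foldl pvScanStep ([], [])
  let architecture := st.1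
  if architecture.length < 2 then (0, 0)
  else ((architecture.length : Int) - 2, pvParamsRec architecture)

-- ===== PRECONDITION & SPEC =====
def Spec_parse_model_architecture (model_name : String) (out : Int × Int) : Prop := out = parse_model_architecture_alt model_name
instance (model_name : String) (out : Int × Int) : Decidable (Spec_parse_model_architecture model_name out) := by unfold Spec_parse_model_architecture; infer_instance

-- ===== CLAIM (what is proved, stated in full; the proofs are below) =====
def Claim_equal_parse_model_architecture : Prop := ∀ (model_name : String), Dom_parse_model_architecture model_name → Spec_parse_model_architecture model_name (parse_model_architecture model_name)

-- ===== LEMMAS AND PROOFS =====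

-- structural specification of str.split('-') on the character list
def pvSos : List Char → List (List Char)
  | [] => [[]]
  | c :: cs => if c = '-' then [] :: pvSos cs else (c :: (pvSos cs).headI) :: (pvSos cs).tail

-- prepend characters onto the first piece
def pvConsHead (t : List Char) : List (List Char) → List (List Char)
  | [] => [t]
  | h :: hs => (t ++ h) :: hs

-- the architecture list a given list of pieces produces
def pvTarget (parts : List (List Char)) : List Int :=
  (parts.filter PySem.Chars.strIsdigit).map (fun q => (PySem.Int.ofChars? q).getD 0)

theorem pvSos_ne_nil (cs : List Char) : pvSos cs ≠ [] := by
  cases cs with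
  | nil => simp [pvSos]
  | cons c cs => unfold pvSos; split <;> simp

theorem pvConsHead_nil (l : List (List Char)) (h : l ≠ []) : pvConsHead [] l = l := by
  cases l with
  | nil => exact absurd rfl h
  | cons a t => simp [pvConsHead]

theorem pv_go_eq (cs : List Char) : ∀ (fuel : Nat), cs.length ≤ fuel → ∀ (cur : List Char) (acc : List (List Char)),
    PySem.Chars.splitOn.go ['-'] fuel cs cur acc = acc.reverse ++ pvConsHead cur.reverse (pvSos cs) := by
  induction cs with
  | nil =>
    intro fuel _ cur acc
    cases fuel <;> simp [PySem.Chars.splitOn.go, pvSos, pvConsHead]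
  | cons c cs ih =>
    intro fuel hf cur acc
    cases fuel with
    | zero => simp at hf
    | succ f =>
      have hf' : cs.length ≤ f := by simpa using hf
      show (if ['-'].isPrefixOf (c :: cs) then
              PySem.Chars.splitOn.go ['-'] f (List.drop 1 (c :: cs)) [] (cur.reverse :: acc)
            else PySem.Chars.splitOn.go ['-'] f cs (c :: cur) acc) = _
      by_cases hc : c = '-'
      · subst hc
        rw [if_pos (by simp [List.isPrefixOf])]
        rw [List.drop_one, List.tail_cons, ih f hf' [] (cur.reverse :: acc)]
        simp only [List.reverse_nil, pvConsHead_nil _ (pvSos_ne_nil cs)]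
        have hsos : pvSos ('-' :: cs) = [] :: pvSos cs := by simp [pvSos]
        rw [hsos]
        simp [pvConsHead]
      · rw [if_neg (by simp [List.isPrefixOf]; exact Ne.symm hc)]
        rw [ih f hf' (c :: cur) acc]
        have hsos : pvSos (c :: cs) = (c :: (pvSos cs).headI) :: (pvSos cs).tail := by
          simp [pvSos, hc]
        rw [hsos]
        rcases hs : pvSos cs with _ | ⟨h, hs'⟩
        · exact absurd hs (pvSos_ne_nil cs)
        · simp [pvConsHead]

theorem pv_splitOn_eq (cs : List Char) : PySem.Chars.splitOn cs ['-'] = pvSos cs := by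
  show PySem.Chars.splitOn.go ['-'] (cs.length + 1) cs [] [] = pvSos cs
  rw [pv_go_eq cs (cs.length + 1) (by omega) [] []]
  simpa using pvConsHead_nil _ (pvSos_ne_nil cs)

-- flushing at '-' appends the token's value exactly when it is a nonempty digit string
theorem pv_flush (st : List Int × List Char) :
    pvScanStep st '-' = (if PySem.Chars.strIsdigit st.2 then st.1 ++ [(PySem.Int.ofChars? st.2).getD 0] else st.1, []) := by
  unfold pvScanStep PySem.Chars.strIsdigit PySem.Chars.isdigit
  simp

-- the tokenizer's architecture list is pvTarget of the split pieces
theorem pv_scan_eq (cs : List Char) : ∀ (arch : List Int) (token : List Char),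
    ((cs ++ ['-']).foldl pvScanStep (arch, token)).1
      = arch ++ pvTarget (pvConsHead token (pvSos cs)) := by
  induction cs with
  | nil =>
    intro arch token
    simp only [List.nil_append, List.foldl_cons, List.foldl_nil, pv_flush]
    by_cases hd : PySem.Chars.strIsdigit token <;>
      simp [hd, pvSos, pvConsHead, pvTarget]
  | cons c cs ih =>
    intro arch token
    simp only [List.cons_append, List.foldl_cons]
    by_cases hc : c = '-'
    · subst hc
      rw [pv_flush, ih _ [], pvConsHead_nil _ (pvSos_ne_nil cs)]
      have hsos : pvSos ('-' :: cs) = [] :: pvSos cs := by simp [pvSos]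
      rw [hsos]
      by_cases hd : PySem.Chars.strIsdigit token <;>
        simp [hd, pvConsHead, pvTarget]
    · rw [show pvScanStep (arch, token) c = (arch, token ++ [c]) from by
        simp [pvScanStep, hc]]
      rw [ih arch (token ++ [c])]
      have hsos : pvSos (c :: cs) = (c :: (pvSos cs).headI) :: (pvSos cs).tail := by
        simp [pvSos, hc]
      rw [hsos]
      rcases hs : pvSos cs with _ | ⟨h, hs'⟩
      · exact absurd hs (pvSos_ne_nil cs)
      · simp [pvConsHead]

-- B's recursion equals the pair-product + tail-sum view of the loop
theorem pvParamsRec_eq (l : List Int) :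
    pvParamsRec l = ((l.zip l.tail).map (fun ab => ab.1 * ab.2)).sum + l.tail.sum := by
  induction l with
  | nil => simp [pvParamsRec]
  | cons a t ih =>
    cases t with
    | nil => simp [pvParamsRec]
    | cons b t' =>
      simp only [pvParamsRec, ih]
      simp [List.zip_cons_cons]
      ring

-- A's index loop over adjacent pairs equals the zip/tail decomposition
theorem pv_loop_eq (l : List Int) :
    (PySem.List.pyRange 0 ((l.length : Int) - 1) 1).foldl
      (fun acc i => acc + PySem.List.pyGetD l i 0 * PySem.List.pyGetD l (i+1) 0
                        + PySem.List.pyGetD l (i+1) 0) 0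
      = ((l.zip l.tail).map (fun ab => ab.1 * ab.2)).sum + l.tail.sum := by
  cases l with
  | nil => simp [PySem.List.pyRange_one_eq_nil]
  | cons x t =>
    set l := x :: t with hl
    have hpairs : ((l.length : Int) - 1) = ((l.zip l.tail).length : Int) := by
      simp [hl, List.length_zip]
    rw [hpairs]
    have hcongr : ∀ (acc : Int), ∀ i ∈ PySem.List.pyRange 0 ((l.zip l.tail).length : Int) 1,
        (acc + PySem.List.pyGetD l i 0 * PySem.List.pyGetD l (i+1) 0 + PySem.List.pyGetD l (i+1) 0)
          = ((fun (acc : Int) (ab : Int × Int) => acc + ab.1 * ab.2 + ab.2) acc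
              (PySem.List.pyGetD (l.zip l.tail) i (0, 0))) := by
      intro acc i hi
      rw [PySem.List.mem_pyRange_one] at hi
      obtain ⟨j, rfl⟩ := Int.eq_ofNat_of_zero_le hi.1
      have hj : j < (l.zip l.tail).length := by exact_mod_cast hi.2
      have hj1 : j < l.length := by simp [List.length_zip] at hj ⊢; omega
      have hj2 : j + 1 < l.length := by simp [List.length_zip] at hj ⊢; omega
      have hget : PySem.List.pyGetD (l.zip l.tail) (j : Int) (0, 0) = (l[j], l[j+1]) := by
        rw [PySem.List.pyGetD_natCast, List.getD_eq_getElem _ _ hj, List.getElem_zip]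
        simp [List.getElem_tail]
      have h1 : PySem.List.pyGetD l (j : Int) 0 = l[j] := by
        rw [PySem.List.pyGetD_natCast, List.getD_eq_getElem _ _ hj1]
      have h2 : PySem.List.pyGetD l ((j : Int) + 1) 0 = l[j+1] := by
        have : ((j : Int) + 1) = ((j + 1 : Nat) : Int) := by push_cast; ring
        rw [this, PySem.List.pyGetD_natCast, List.getD_eq_getElem _ _ hj2]
      rw [hget, h1, h2]
    rw [PySem.List.foldl_congr_mem _ _ _ _ hcongr]
    rw [PySem.List.foldl_pyRange_zero_pyGetD' (l.zip l.tail) (0, 0)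
        (fun (acc : Int) (ab : Int × Int) => acc + ab.1 * ab.2 + ab.2) 0]
    have hsplit : ∀ (ps : List (Int × Int)) (a : Int),
        ps.foldl (fun acc ab => acc + ab.1 * ab.2 + ab.2) a
          = a + (ps.map (fun ab => ab.1 * ab.2)).sum + (ps.map (fun ab => ab.2)).sum := by
      intro ps
      induction ps with
      | nil => simp
      | cons p t ihp => intro a; simp [ihp]; ring
    rw [hsplit]
    have hsnd : (l.zip l.tail).map (fun ab => ab.2) = l.tail := by
      have := List.map_snd_zip (l₁ := l) (l₂ := l.tail) (by simp [hl])
      simpa using this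
    rw [hsnd, zero_add]

-- both ports build the same architecture list
theorem pv_arch_eq (model_name : String) :
    ((PySem.Str.split? model_name "-").getD []).foldl (fun acc part =>
        if PySem.Str.strIsdigit part then acc ++ [(PySem.Int.ofStr? part).getD 0] else acc) []
      = ((model_name.toList ++ ['-']).foldl pvScanStep ([], [])).1 := by
  have hsplit := PySem.Str.split?_map model_name "-"
  rcases hp : PySem.Str.split? model_name "-" with _ | parts
  · rw [hp] at hsplit
    simp [PySem.Chars.split?] at hsplit
  · rw [hp] at hsplit
    have hparts : parts.map String.toList = PySem.Chars.splitOn model_name.toList ['-'] := by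
      simpa [PySem.Chars.split?] using hsplit
    rw [pv_scan_eq model_name.toList [] [], pvConsHead_nil _ (pvSos_ne_nil _)]
    rw [← pv_splitOn_eq, ← hparts]
    rw [PySem.List.foldl_append_if]
    simp only [List.nil_append, pvTarget, List.filter_map]
    rw [List.map_map]
    simp [Function.comp_def, PySem.Int.ofStr?]
    rfl

-- ===== VERDICT (by name: the statement is the Claim_ definition above) =====
theorem parse_model_architecture_spec : Claim_equal_parse_model_architecture := by
  intro model_name _
  unfold Spec_parse_model_architecture parse_model_architecture parse_model_architecture_alt
  dsimp only
  rw [pv_arch_eq model_name]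
  set l := ((model_name.toList ++ ['-']).foldl pvScanStep ([], [])).1 with hl
  by_cases h : l.length < 2
  · simp [h]
  · simp only [h, if_false]
    exact Prod.ext rfl ((pv_loop_eq l).trans (pvParamsRec_eq l).symm)
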